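-- pv_equiv track=rewrite | github.com/tangqingfeng7/Oopzbot | src/domain/safety/profanity_rules.py | match_context_keyword
-- ===== SOURCE A (Python) =====
-- from collections.abc import Sequence
-- from typing import Optional
--
-- def match_keyword(text: str, keywords: Sequence[str]) -> Optional[str]:
--     lowered = text.lower()
--     for keyword in keywords:
--         if keyword in lowered:
--             return keyword
--     return None
--
-- def match_context_keyword(
--     messages: Sequence[str],
--     keywords: Sequence[str],
-- ) -> Optional[tuple[str, int]]:
--     if len(messages) < 2:
--         return None
--
--     for start in range(len(messages) - 2, -1, -1):
--         keyword = match_keyword("".join(messages[start:]), keywords)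
--         if keyword:
--             return keyword, start
--     return None
-- ===== SOURCE B (Python) =====
-- def _first_keyword(text, keywords):
--     lowered = text.lower()
--     for k in keywords:
--         if k in lowered:
--             return k
--     return None
--
--
-- def match_context_keyword(messages, keywords):
--     n = len(messages)
--     if n < 2:
--         return None
--     if not _first_keyword("".join(messages), keywords):
--         return None
--     # "a keyword truthily matches the suffix starting at s" is monotone in s
--     # (a longer suffix contains every shorter one), so binary-search the
--     # largest matching start
--     lo, hi = 0, n - 2
--     while lo < hi:
--         mid = (lo + hi + 1) // 2
--         if _first_keyword("".join(messages[mid:]), keywords):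
--             lo = mid
--         else:
--             hi = mid - 1
--     return (_first_keyword("".join(messages[lo:]), keywords), lo)
-- ===== Notes on version B (the rewrite author's own statement) =====
-- stated objective: alternative
-- what changed: Replaces A's linear descending scan that re-joins and re-searches every suffix with a binary search over start positions, exploiting that 'a keyword truthily matches the suffix starting at s' is monotone in s (a longer suffix contains every shorter one); A needs fewer joins when a late suffix already matches, B fewer when the match is early or absent, so no speed is claimed.
import Mathlib
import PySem

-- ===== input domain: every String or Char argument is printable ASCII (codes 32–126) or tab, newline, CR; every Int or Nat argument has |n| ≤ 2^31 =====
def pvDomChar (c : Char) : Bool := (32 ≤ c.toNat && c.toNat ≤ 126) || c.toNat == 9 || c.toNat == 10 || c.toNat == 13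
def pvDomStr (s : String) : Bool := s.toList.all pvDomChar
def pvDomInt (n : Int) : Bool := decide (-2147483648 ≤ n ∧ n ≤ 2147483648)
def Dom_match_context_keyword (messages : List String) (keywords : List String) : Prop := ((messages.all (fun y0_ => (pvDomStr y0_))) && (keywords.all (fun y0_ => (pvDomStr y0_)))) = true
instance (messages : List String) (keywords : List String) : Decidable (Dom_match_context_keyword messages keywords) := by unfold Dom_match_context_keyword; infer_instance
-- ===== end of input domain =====

-- B replaces A's descending suffix scan by a binary search on the start index
-- (the truthy match predicate is monotone in the start): alternative algorithm.

-- ===== PORT A =====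
-- helper match_keyword: first keyword contained in text.lower()
def matchKeywordLoop (lowered : String) : List String → Option String
  | [] => none
  | k :: ks => if PySem.Str.isIn k lowered then some k else matchKeywordLoop lowered ks

def matchKeywordA (text : String) (keywords : List String) : Option String :=
  matchKeywordLoop (PySem.Str.lower text) keywords

-- one iteration of A's loop body: keyword = match_keyword("".join(messages[start:]), keywords); if keyword: return keyword, start
def aStep (messages keywords : List String) (s : Nat) : Option (String × Int) :=
  match matchKeywordA (PySem.Str.join "" (PySem.List.slice messages (some (s : Int)) none)) keywords with
  | some k => if k = "" then none else some (k, (s : Int))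
  | none => none

-- for start in range(len(messages)-2, -1, -1): descending scan
def aScan (messages keywords : List String) : Nat → Option (String × Int)
  | 0 => aStep messages keywords 0
  | s + 1 =>
    match aStep messages keywords (s + 1) with
    | some r => some r
    | none => aScan messages keywords s

def match_context_keyword (messages : List String) (keywords : List String) : Option (String × Int) :=
  if messages.length < 2 then none
  else aScan messages keywords (messages.length - 2)

-- ===== PORT B =====
-- helper _first_keyword: first keyword contained in text.lower()
def bMatchLoop (lowered : String) : List String → Option String
  | [] => none
  | k :: ks => if PySem.Str.isIn k lowered then some k else bMatchLoop lowered ks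

def bMatch (text : String) (keywords : List String) : Option String :=
  bMatchLoop (PySem.Str.lower text) keywords

-- Python truthiness of an Optional[str]: None and "" are falsy
def optTruthy (o : Option String) : Bool :=
  match o with
  | none => false
  | some k => !(k == "")

-- "".join(messages[s:])
def bSuffix (messages : List String) (s : Nat) : String :=
  PySem.Str.join "" (PySem.List.slice messages (some (s : Int)) none)

-- while lo < hi: binary search for the largest start whose suffix truthily matches
def bSearch (messages keywords : List String) (lo hi : Nat) : Nat :=
  if lo < hi then
    -- mid = (lo + hi + 1) // 2
    if optTruthy (bMatch (bSuffix messages ((lo + hi + 1) / 2)) keywords) then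
      bSearch messages keywords ((lo + hi + 1) / 2) hi
    else bSearch messages keywords lo ((lo + hi + 1) / 2 - 1)
  else lo
termination_by hi - lo
decreasing_by all_goals omega

def match_context_keyword_alt (messages : List String) (keywords : List String) : Option (String × Int) :=
  if messages.length < 2 then none
  else if optTruthy (bMatch (bSuffix messages 0) keywords) = false then none
  else
    let r := bSearch messages keywords 0 (messages.length - 2)
    -- return (_first_keyword(...), lo): the loop invariant keeps the match truthy at lo
    match bMatch (bSuffix messages r) keywords with
    | some k => some (k, (r : Int))
    | none => none

-- ===== PRECONDITION & SPEC =====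
def Spec_match_context_keyword (messages : List String) (keywords : List String) (out : Option (String × Int)) : Prop := out = match_context_keyword_alt messages keywords
instance (messages : List String) (keywords : List String) (out : Option (String × Int)) : Decidable (Spec_match_context_keyword messages keywords out) := by unfold Spec_match_context_keyword; infer_instance

-- ===== CLAIM (what is proved, stated in full; the proofs are below) =====
def Claim_equal_match_context_keyword : Prop := ∀ (messages : List String) (keywords : List String), Dom_match_context_keyword messages keywords → Spec_match_context_keyword messages keywords (match_context_keyword messages keywords)

-- ===== LEMMAS AND PROOFS =====

-- the two loop helpers are the same fold over the keyword list
theorem bMatchLoop_eq_matchKeywordLoop (lowered : String) (ks : List String) :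
    bMatchLoop lowered ks = matchKeywordLoop lowered ks := by
  induction ks with
  | nil => rfl
  | cons k ks ih => simp only [bMatchLoop, matchKeywordLoop, ih]

-- the truthy match predicate at start s
def pMatch (messages keywords : List String) (s : Nat) : Bool :=
  optTruthy (bMatch (bSuffix messages s) keywords)

-- A's loop body returns none exactly when the match at s is falsy …
theorem aStep_none (messages keywords : List String) (s : Nat)
    (h : pMatch messages keywords s = false) : aStep messages keywords s = none := by
  simp only [pMatch, bMatch, bSuffix, optTruthy] at h
  simp only [aStep, matchKeywordA, ← bMatchLoop_eq_matchKeywordLoop]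
  rcases ho : bMatchLoop (PySem.Str.lower (PySem.Str.join "" (PySem.List.slice messages (some (s : Int)) none))) keywords with _ | k
  · rfl
  · rw [ho] at h
    simp at h
    simp [h]

-- … and otherwise returns the matching keyword paired with s
theorem aStep_hit (messages keywords : List String) (s : Nat)
    (h : pMatch messages keywords s = true) :
    aStep messages keywords s = (bMatch (bSuffix messages s) keywords).map (fun k => (k, (s : Int))) := by
  simp only [pMatch, bMatch, bSuffix, optTruthy] at h
  simp only [aStep, bMatch, bSuffix, matchKeywordA, ← bMatchLoop_eq_matchKeywordLoop]
  rcases ho : bMatchLoop (PySem.Str.lower (PySem.Str.join "" (PySem.List.slice messages (some (s : Int)) none))) keywords with _ | k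
  · rw [ho] at h; simp at h
  · rw [ho] at h
    simp at h
    simp [h]

-- join with the empty separator is flatten
theorem join_nil_flatten (c : List (List Char)) : PySem.Chars.join [] c = c.flatten := by
  show [].intercalate c = c.flatten
  induction c with
  | nil => simp [List.intercalate]
  | cons x xs ih => cases xs <;> simp_all [List.intercalate, List.intersperse]

-- the empty string is contained in every string
theorem isIn_empty (s : String) : PySem.Str.isIn "" s = true := by
  rw [PySem.Str.isIn_iff_infix]
  exact List.nil_infix

-- truthy success of the loop is monotone under extending the searched text on the left:
-- a falsy hit is necessarily the empty keyword, which matches every text, so the first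
-- truthy hit can only appear, never disappear, in a longer text
theorem bMatchLoop_mono (u v : String) (hv : u.toList <:+ v.toList)
    (ks : List String) (h : optTruthy (bMatchLoop (PySem.Str.lower u) ks) = true) :
    optTruthy (bMatchLoop (PySem.Str.lower v) ks) = true := by
  induction ks with
  | nil => simp [bMatchLoop, optTruthy] at h
  | cons k ks ih =>
    simp only [bMatchLoop] at h ⊢
    by_cases hin : PySem.Str.isIn k (PySem.Str.lower u) = true
    · have hin' : PySem.Str.isIn k (PySem.Str.lower v) = true := by
        rw [PySem.Str.isIn_iff_infix] at hin ⊢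
        rw [PySem.Str.toList_lower] at hin ⊢
        obtain ⟨pre, hpre⟩ := hv
        rw [← hpre]
        simp only [PySem.Chars.lower, List.map_append]
        exact hin.trans ((List.suffix_append _ _).isInfix)
      rw [if_pos hin] at h
      rw [if_pos hin']
      exact h
    · have hk : k ≠ "" := fun he => hin (he ▸ isIn_empty _)
      rw [if_neg hin] at h
      by_cases hin2 : PySem.Str.isIn k (PySem.Str.lower v) = true
      · rw [if_pos hin2]
        simp [optTruthy, hk]
      · rw [if_neg hin2]
        exact ih h

-- the suffix at s is a suffix of the suffix at any earlier s'
theorem bSuffix_suffix (messages : List String) (s' s : Nat) (hle : s' ≤ s) :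
    (bSuffix messages s).toList <:+ (bSuffix messages s').toList := by
  simp only [bSuffix, PySem.Str.toList_join, PySem.List.slice_from_natCast]
  have h0 : ("".toList : List Char) = [] := rfl
  rw [h0, join_nil_flatten, join_nil_flatten]
  refine ⟨(((messages.drop s').take (s - s')).map String.toList).flatten, ?_⟩
  rw [← List.flatten_append, ← List.map_append]
  congr 2
  conv_rhs => rw [← List.take_append_drop (s - s') (messages.drop s')]
  congr 1
  rw [List.drop_drop]
  congr 1
  omega

-- monotonicity of the match predicate
theorem pMatch_mono (messages keywords : List String) (s' s : Nat) (hle : s' ≤ s)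
    (h : pMatch messages keywords s = true) : pMatch messages keywords s' = true := by
  simp only [pMatch, bMatch] at h ⊢
  exact bMatchLoop_mono _ _ (bSuffix_suffix messages s' s hle) keywords h

-- A's scan returns none when no suffix truthily matches
theorem aScan_none (messages keywords : List String) :
    ∀ s, (∀ t, t ≤ s → pMatch messages keywords t = false) → aScan messages keywords s = none := by
  intro s
  induction s with
  | zero =>
    intro h
    simp [aScan, aStep_none messages keywords 0 (h 0 le_rfl)]
  | succ s ih =>
    intro h
    simp only [aScan, aStep_none messages keywords (s + 1) (h (s + 1) le_rfl)]
    exact ih (fun t ht => h t (by omega))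

-- A's scan returns the match at the largest truthily matching start r
theorem aScan_hit (messages keywords : List String) :
    ∀ s r, r ≤ s → pMatch messages keywords r = true →
      (∀ t, r < t → t ≤ s → pMatch messages keywords t = false) →
      aScan messages keywords s = (bMatch (bSuffix messages r) keywords).map (fun k => (k, (r : Int))) := by
  intro s
  induction s with
  | zero =>
    intro r hr hp _
    interval_cases r
    simp [aScan, aStep_hit messages keywords 0 hp]
  | succ s ih =>
    intro r hr hp hab
    by_cases hr' : r = s + 1
    · subst hr'
      rw [aScan, aStep_hit messages keywords (s + 1) hp]
      simp only [pMatch, optTruthy] at hp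
      rcases ho : bMatch (bSuffix messages (s + 1)) keywords with _ | k
      · rw [ho] at hp; simp at hp
      · simp
    · have hrs : r ≤ s := by omega
      have htop := aStep_none messages keywords (s + 1) (hab (s + 1) (by omega) le_rfl)
      simp only [aScan, htop]
      exact ih r hrs hp (fun t ht hts => hab t ht (by omega))

-- binary-search invariant: starting from a truthily matching lo with nothing matching in
-- (hi, N], bSearch lands on the largest truthily matching start in [lo, N]
theorem bSearch_spec (messages keywords : List String) (N : Nat) :
    ∀ lo hi, lo ≤ hi → hi ≤ N → pMatch messages keywords lo = true →
      (∀ t, hi < t → t ≤ N → pMatch messages keywords t = false) →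
      lo ≤ bSearch messages keywords lo hi ∧ bSearch messages keywords lo hi ≤ hi ∧
      pMatch messages keywords (bSearch messages keywords lo hi) = true ∧
      (∀ t, bSearch messages keywords lo hi < t → t ≤ N → pMatch messages keywords t = false) := by
  intro lo hi
  induction lo, hi using bSearch.induct messages keywords with
  | case1 lo hi hlt hmatch ih =>
    intro _ hN _ habove
    rw [bSearch, if_pos hlt, if_pos hmatch]
    have := ih (by omega) hN hmatch habove
    exact ⟨by omega, this.2.1, this.2.2⟩
  | case2 lo hi hlt hmatch ih =>
    intro hle hN hlo habove
    rw [bSearch, if_pos hlt, if_neg hmatch]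
    have habove' : ∀ t, (lo + hi + 1) / 2 - 1 < t → t ≤ N → pMatch messages keywords t = false := by
      intro t ht htN
      by_cases h2 : hi < t
      · exact habove t h2 htN
      · -- (lo+hi+1)/2 ≤ t: monotonicity transfers the failure at mid upward
        rw [Bool.not_eq_true] at hmatch
        by_contra hc
        rw [Bool.not_eq_false] at hc
        have := pMatch_mono messages keywords ((lo + hi + 1) / 2) t (by omega) hc
        simp only [pMatch] at this
        rw [this] at hmatch
        exact absurd hmatch (by simp)
    have := ih (by omega) (by omega) hlo habove'
    exact ⟨this.1, by omega, this.2.2.1, fun t ht htN => this.2.2.2 t ht htN⟩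
  | case3 lo hi hlt =>
    intro hle hN hlo habove
    rw [bSearch, if_neg hlt]
    exact ⟨le_rfl, hle, hlo, fun t ht htN => habove t (by omega) htN⟩

-- ===== VERDICT (by name: the statement is the Claim_ definition above) =====
theorem match_context_keyword_spec : Claim_equal_match_context_keyword := by
  intro messages keywords _
  unfold Spec_match_context_keyword
  unfold match_context_keyword match_context_keyword_alt
  by_cases hn : messages.length < 2
  · simp [hn]
  · rw [if_neg hn, if_neg hn]
    by_cases h0 : optTruthy (bMatch (bSuffix messages 0) keywords) = false
    · -- nothing matches truthily anywhere: both sides return none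
      rw [if_pos h0]
      apply aScan_none
      intro t _
      by_contra hc
      rw [Bool.not_eq_false] at hc
      have := pMatch_mono messages keywords 0 t (Nat.zero_le t) hc
      simp only [pMatch] at this
      rw [this] at h0
      exact absurd h0 (by simp)
    · rw [if_neg h0]
      have hp0 : pMatch messages keywords 0 = true := by
        simp only [pMatch]
        simpa using h0
      obtain ⟨h1, h2, h3, h4⟩ := bSearch_spec messages keywords (messages.length - 2) 0
        (messages.length - 2) (Nat.zero_le _) le_rfl hp0 (fun t ht htN => absurd htN (by omega))
      rw [aScan_hit messages keywords (messages.length - 2) _ h2 h3 (fun t ht hts => h4 t ht hts)]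
      rcases ho : bMatch (bSuffix messages (bSearch messages keywords 0 (messages.length - 2))) keywords with _ | k
      · simp only [pMatch, optTruthy, ho] at h3; simp at h3
      · simp [ho]
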